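-- pv_equiv track=rewrite | github.com/tmould1/dystopia-mud | game/tools/map_generator.py | read_tilde_string
-- ===== SOURCE A (Python) =====
-- from typing import Dict, List, Optional, Tuple, Set, Any
--
-- def read_tilde_string(lines: List[str], idx: int) -> Tuple[str, int]:
--     """Read a tilde-terminated string from lines, starting at idx."""
--     result = []
--     while idx < len(lines):
--         line = lines[idx]
--         if line.endswith('~'):
--             result.append(line[:-1])
--             return '\n'.join(result), idx + 1
--         result.append(line)
--         idx += 1
--     return '\n'.join(result), idx
-- ===== SOURCE B (Python) =====
-- def read_tilde_string(lines, idx):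
--     """Read a tilde-terminated string from lines, starting at idx."""
--     j = idx
--     n = len(lines)
--     while j < n and not lines[j].endswith('~'):
--         j += 1
--     if j < n:
--         return '\n'.join(lines[idx:j] + [lines[j][:-1]]), j + 1
--     return '\n'.join(lines[idx:]), j
-- ===== Notes on version B (the rewrite author's own statement) =====
-- stated objective: alternative
-- what changed: B replaces A's accumulate-lines-while-scanning loop by a find-the-terminator index scan followed by one slice-and-join; only a boundary index is maintained and the string is built in a single join at the end.
-- outside the precondition, e.g. on read_tilde_string(['a~', 'b'], -1): A returns ('b\na', 1), B returns ('a', 1)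
import Mathlib
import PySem

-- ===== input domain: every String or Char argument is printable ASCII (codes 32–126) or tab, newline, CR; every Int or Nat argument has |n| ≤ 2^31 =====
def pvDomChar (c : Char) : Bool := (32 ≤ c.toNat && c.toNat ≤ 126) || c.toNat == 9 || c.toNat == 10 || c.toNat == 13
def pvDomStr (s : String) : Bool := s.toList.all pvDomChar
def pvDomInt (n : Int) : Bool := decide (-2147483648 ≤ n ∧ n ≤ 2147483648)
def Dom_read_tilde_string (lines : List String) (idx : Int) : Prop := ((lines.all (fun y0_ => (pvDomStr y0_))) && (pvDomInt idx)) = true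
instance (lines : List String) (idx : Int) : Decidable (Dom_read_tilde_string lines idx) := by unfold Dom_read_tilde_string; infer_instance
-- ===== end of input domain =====

-- B replaces A's accumulate-while-scanning loop by a find-terminator-index scan plus one
-- slice-and-join (alternative decomposition, same cost).

-- ===== PORT A =====
-- the while loop of A: carries the accumulator `result` and the moving index `idx`
def readTildeGo (lines : List String) (idx : Int) (result : List String) : String × Int :=
  if _h : idx < (lines.length : Int) then
    let line := (PySem.List.pyGet? lines idx).getD ""
    if PySem.Str.endswith line "~" then
      (PySem.Str.join "\n" (result ++ [PySem.Str.slice line none (some (-1))]), idx + 1)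
    else
      readTildeGo lines (idx + 1) (result ++ [line])
  else
    (PySem.Str.join "\n" result, idx)
termination_by ((lines.length : Int) - idx).toNat
decreasing_by omega

def read_tilde_string (lines : List String) (idx : Int) : String × Int :=
  readTildeGo lines idx []

-- ===== PORT B =====
-- B's while loop: advance j until lines[j] ends with '~' or j reaches len(lines)
def findTilde (lines : List String) (j : Int) : Int :=
  if _h : j < (lines.length : Int) then
    if PySem.Str.endswith ((PySem.List.pyGet? lines j).getD "") "~" then j
    else findTilde lines (j + 1)
  else j
termination_by ((lines.length : Int) - j).toNat
decreasing_by omega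

def read_tilde_string_alt (lines : List String) (idx : Int) : String × Int :=
  let n : Int := PySem.List.len lines
  let j := findTilde lines idx
  if j < n then
    (PySem.Str.join "\n"
      (PySem.List.slice lines (some idx) (some j) ++
        [PySem.Str.slice ((PySem.List.pyGet? lines j).getD "") none (some (-1))]), j + 1)
  else
    (PySem.Str.join "\n" (PySem.List.slice lines (some idx) none), j)

-- ===== PRECONDITION & SPEC =====
-- Pre_ excludes negative idx, which is outside the natural line-index domain of this reader:
-- there A reads lines via Python negative-index wraparound (and raises IndexError on an empty list),
-- behaviour neither implementation is meant for.
def Pre_read_tilde_string (lines : List String) (idx : Int) : Prop := 0 ≤ idx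
instance (lines : List String) (idx : Int) : Decidable (Pre_read_tilde_string lines idx) := by unfold Pre_read_tilde_string; infer_instance

def pvWitness_read_tilde_string : List String × Int := (["hello", "world~", "rest"], 0)

def Spec_read_tilde_string (lines : List String) (idx : Int) (out : String × Int) : Prop := out = read_tilde_string_alt lines idx
instance (lines : List String) (idx : Int) (out : String × Int) : Decidable (Spec_read_tilde_string lines idx out) := by unfold Spec_read_tilde_string; infer_instance

-- ===== CLAIM (what is proved, stated in full; the proofs are below) =====
def Claim_equal_read_tilde_string : Prop := ∀ (lines : List String) (idx : Int), Dom_read_tilde_string lines idx → Pre_read_tilde_string lines idx → Spec_read_tilde_string lines idx (read_tilde_string lines idx)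

-- ===== LEMMAS AND PROOFS =====

-- findTilde never moves the index backwards
theorem le_findTilde (lines : List String) (j : Int) : j ≤ findTilde lines j := by
  unfold findTilde
  split
  · split
    · exact le_refl j
    · have := le_findTilde lines (j + 1); omega
  · exact le_refl j
termination_by ((lines.length : Int) - j).toNat
decreasing_by omega

-- loop invariant: A's loop from idx with accumulator `result` produces B's slice-and-join
-- of the region [idx, findTilde lines idx), appended to `result`
theorem readTildeGo_eq (lines : List String) (idx : Int) (result : List String)
    (hidx : 0 ≤ idx) :
    readTildeGo lines idx result =
      (if findTilde lines idx < (lines.length : Int) then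
        (PySem.Str.join "\n"
          (result ++ PySem.List.slice lines (some idx) (some (findTilde lines idx)) ++
            [PySem.Str.slice ((PySem.List.pyGet? lines (findTilde lines idx)).getD "") none (some (-1))]),
          findTilde lines idx + 1)
      else
        (PySem.Str.join "\n" (result ++ PySem.List.slice lines (some idx) none),
          findTilde lines idx)) := by
  rw [readTildeGo]
  by_cases h : idx < (lines.length : Int)
  · simp only [dif_pos h]
    by_cases he : PySem.Str.endswith ((PySem.List.pyGet? lines idx).getD "") "~" = true
    · have hf : findTilde lines idx = idx := by
        rw [findTilde]; simp only [dif_pos h, if_pos he]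
      rw [if_pos he, hf]
      simp only [if_pos h]
      have hs : PySem.List.slice lines (some idx) (some idx) = ([] : List String) := by
        rw [PySem.List.slice_toNat lines hidx hidx]; simp
      simp [hs]
    · have hf : findTilde lines idx = findTilde lines (idx + 1) := by
        rw [findTilde]; simp only [dif_pos h, if_neg he]
      have hle : idx + 1 ≤ findTilde lines (idx + 1) := le_findTilde lines (idx + 1)
      have hget : (PySem.List.pyGet? lines idx).getD "" = lines[idx.toNat]! := by
        rw [PySem.List.pyGet?_of_nonneg lines hidx]
        have hlt : idx.toNat < lines.length := by omega
        simp [hlt]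
      have hdrop : lines.drop idx.toNat = lines[idx.toNat]! :: lines.drop (idx.toNat + 1) := by
        have hlt : idx.toNat < lines.length := by omega
        rw [List.drop_eq_getElem_cons hlt]
        simp [hlt]
      rw [if_neg he]
      rw [readTildeGo_eq lines (idx + 1) (result ++ [(PySem.List.pyGet? lines idx).getD ""]) (by omega)]
      rw [hf]
      by_cases hj : findTilde lines (idx + 1) < (lines.length : Int)
      · simp only [if_pos hj]
        have hslice : PySem.List.slice lines (some idx) (some (findTilde lines (idx + 1))) =
            (PySem.List.pyGet? lines idx).getD "" ::
              PySem.List.slice lines (some (idx + 1)) (some (findTilde lines (idx + 1))) := by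
          rw [PySem.List.slice_toNat lines hidx (by omega), PySem.List.slice_toNat lines (by omega) (by omega)]
          have h1 : (idx + 1).toNat = idx.toNat + 1 := by omega
          rw [h1, hget, hdrop]
          have h2 : (findTilde lines (idx + 1)).toNat - idx.toNat
              = ((findTilde lines (idx + 1)).toNat - (idx.toNat + 1)) + 1 := by omega
          rw [h2, List.take_succ_cons]
        rw [hslice]; simp
      · simp only [if_neg hj]
        have hslice : PySem.List.slice lines (some idx) none =
            (PySem.List.pyGet? lines idx).getD "" :: PySem.List.slice lines (some (idx + 1)) none := by
          rw [PySem.List.slice_from lines hidx, PySem.List.slice_from lines (by omega)]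
          have h1 : (idx + 1).toNat = idx.toNat + 1 := by omega
          rw [h1, hget, hdrop]
        rw [hslice]; simp
  · simp only [dif_neg h]
    have hf : findTilde lines idx = idx := by rw [findTilde]; simp only [dif_neg h]
    rw [hf]
    simp only [if_neg h]
    have hs : PySem.List.slice lines (some idx) none = ([] : List String) := by
      rw [PySem.List.slice_from lines hidx]
      apply List.drop_eq_nil_of_le; omega
    simp [hs]
termination_by ((lines.length : Int) - idx).toNat
decreasing_by omega

-- ===== VERDICT (by name: the statement is the Claim_ definition above) =====
theorem read_tilde_string_spec : Claim_equal_read_tilde_string := by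
  intro lines idx _hdom hpre
  unfold Spec_read_tilde_string read_tilde_string read_tilde_string_alt
  rw [readTildeGo_eq lines idx [] hpre]
  simp [PySem.List.len]
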